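-- pv_equiv track=rewrite | github.com/GinKuReNai/OpenNMT-LCP-dropout | src/lcp_python/lcp_paircomp.py | initialize_zeroone_list
-- ===== SOURCE A (Python) =====
-- def initialize_zeroone_list(vocab, alphabets):
--     # vocabと対応する符号を格納する配列
--     zeroone_list = []
--     for vi in range(len(vocab)):
--         # メタ文字_が含まれるサブワードに1を付与
--         if '_' in vocab[vi]:
--             zeroone_list.append(1)
--             # アルファベット∑から未削除のメタ文字入サブワードを除外
--             if vocab[vi] in alphabets:
--                 alphabets.remove(vocab[vi])
--         # End of Sentence(<EOS>)に2を付与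
--         elif '<EOS>' == vocab[vi]:
--             zeroone_list.append(2)
--             # アルファベット∑から未削除の<EOS>を除外
--             if '<EOS>' in alphabets:
--                 alphabets.remove('<EOS>')
--         # その他の文字には未割当符号3を付与
--         else:
--             zeroone_list.append(3)
--
--     return zeroone_list, alphabets
-- ===== SOURCE B (Python) =====
-- def initialize_zeroone_list(vocab, alphabets):
--     # One pass over vocab: build codes and count how many removals each value needs.
--     zeroone_list = []
--     need = {}
--     for tok in vocab:
--         if '_' in tok:
--             zeroone_list.append(1)
--             need[tok] = need.get(tok, 0) + 1
--         elif tok == '<EOS>':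
--             zeroone_list.append(2)
--             need['<EOS>'] = need.get('<EOS>', 0) + 1
--         else:
--             zeroone_list.append(3)
--     # One order-preserving pass over alphabets: drop the first `need[x]` occurrences of x.
--     kept = []
--     for x in alphabets:
--         n = need.get(x, 0)
--         if n > 0:
--             need[x] = n - 1
--         else:
--             kept.append(x)
--     return zeroone_list, kept
-- ===== Notes on version B (the rewrite author's own statement) =====
-- stated objective: alternative
-- what changed: Replaces the per-token 'in alphabets'/remove scans with a removal counter built in one pass over vocab, then rebuilds the alphabet list in a single order-preserving pass that drops the first counted occurrences of each value.
import Mathlib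
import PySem

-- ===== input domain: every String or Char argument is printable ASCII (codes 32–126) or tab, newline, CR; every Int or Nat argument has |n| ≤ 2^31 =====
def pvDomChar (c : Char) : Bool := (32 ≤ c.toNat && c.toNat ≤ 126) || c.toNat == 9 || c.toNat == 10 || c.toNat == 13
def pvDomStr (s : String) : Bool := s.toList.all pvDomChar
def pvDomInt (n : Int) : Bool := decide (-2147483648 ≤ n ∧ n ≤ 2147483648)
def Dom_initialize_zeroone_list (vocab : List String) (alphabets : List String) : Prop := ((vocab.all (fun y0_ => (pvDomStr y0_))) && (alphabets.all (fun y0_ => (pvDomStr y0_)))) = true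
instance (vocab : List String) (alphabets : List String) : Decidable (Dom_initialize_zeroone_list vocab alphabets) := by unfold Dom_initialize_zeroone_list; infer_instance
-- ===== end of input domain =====

-- B replaces A's per-token membership/remove scans over `alphabets` by a removal counter and a
-- single rebuilding pass (objective: alternative). Equivalence is about the RETURN value only: Python A
-- mutates `alphabets` in place (list.remove), Python B leaves it untouched and returns a new list.

-- ===== PORT A =====
def initialize_zeroone_list (vocab : List String) (alphabets : List String) : List Int × List String :=
  vocab.foldl
    (fun (st : List Int × List String) v =>
      if PySem.Str.isIn "_" v then
        (st.1 ++ [1], if st.2.contains v then (PySem.List.remove? st.2 v).getD st.2 else st.2)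
      else if v == "<EOS>" then
        (st.1 ++ [2], if st.2.contains "<EOS>" then (PySem.List.remove? st.2 "<EOS>").getD st.2 else st.2)
      else
        (st.1 ++ [3], st.2))
    ([], alphabets)

-- ===== PORT B =====
def initialize_zeroone_list_alt (vocab : List String) (alphabets : List String) : List Int × List String :=
  let p := vocab.foldl
    (fun (st : List Int × PySem.Dict String Int) tok =>
      if PySem.Str.isIn "_" tok then
        (st.1 ++ [1], st.2.insert tok (st.2.getD tok 0 + 1))
      else if tok == "<EOS>" then
        (st.1 ++ [2], st.2.insert "<EOS>" (st.2.getD "<EOS>" 0 + 1))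
      else
        (st.1 ++ [3], st.2))
    ([], PySem.Dict.empty)
  let q := alphabets.foldl
    (fun (st : PySem.Dict String Int × List String) x =>
      let n := st.1.getD x 0
      if n > 0 then (st.1.insert x (n - 1), st.2) else (st.1, st.2 ++ [x]))
    (p.2, [])
  (p.1, q.2)

-- ===== PRECONDITION & SPEC =====
def Spec_initialize_zeroone_list (vocab : List String) (alphabets : List String) (out : List Int × List String) : Prop := out = initialize_zeroone_list_alt vocab alphabets
instance (vocab : List String) (alphabets : List String) (out : List Int × List String) : Decidable (Spec_initialize_zeroone_list vocab alphabets out) := by unfold Spec_initialize_zeroone_list; infer_instance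

-- ===== CLAIM (what is proved, stated in full; the proofs are below) =====
def Claim_equal_initialize_zeroone_list : Prop := ∀ (vocab : List String) (alphabets : List String), Dom_initialize_zeroone_list vocab alphabets → Spec_initialize_zeroone_list vocab alphabets (initialize_zeroone_list vocab alphabets)

-- ===== LEMMAS AND PROOFS =====

-- the code A/B assigns to a token, and the removal attempt (if any) it triggers
def pvCode (v : String) : Int :=
  if PySem.Str.isIn "_" v then 1 else if v == "<EOS>" then 2 else 3
def pvAttempt (v : String) : Option String :=
  if PySem.Str.isIn "_" v then some v else if v == "<EOS>" then some "<EOS>" else none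

-- A's guarded remove
def pvRemoveFirst (al : List String) (r : String) : List String :=
  if al.contains r then (PySem.List.remove? al r).getD al else al
def pvRemoveSeq (rs : List String) (al : List String) : List String := rs.foldl pvRemoveFirst al

-- keep each element whose needed-removal count has run out, decrementing as we go
def pvSpecKeep : (String → Int) → List String → List String
  | _, [] => []
  | n, x :: al => if n x > 0 then pvSpecKeep (fun y => if y = x then n y - 1 else n y) al
                  else x :: pvSpecKeep n al

theorem pvRemoveFirst_cons_self (r : String) (al : List String) :
    pvRemoveFirst (r :: al) r = al := by
  simp [pvRemoveFirst]

theorem pvRemoveFirst_cons_ne (x r : String) (al : List String) (h : x ≠ r) :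
    pvRemoveFirst (x :: al) r = x :: pvRemoveFirst al r := by
  by_cases hm : r ∈ al
  · have hy := PySem.List.remove?_eq_some_erase al r hm
    simp [pvRemoveFirst, Ne.symm h, hm, PySem.List.remove?_cons_of_ne al h, hy]
  · simp [pvRemoveFirst, Ne.symm h, hm]

-- swap lemma: bumping the count of r by one = removing the first r up front
theorem pvSpecKeep_bump (al : List String) :
    ∀ (n : String → Int) (r : String), 0 ≤ n r →
      pvSpecKeep (fun y => if y = r then n y + 1 else n y) al = pvSpecKeep n (pvRemoveFirst al r) := by
  induction al with
  | nil => intro n r h; simp [pvSpecKeep, pvRemoveFirst]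
  | cons x al ih =>
    intro n r h
    by_cases hx : x = r
    · subst hx
      rw [pvRemoveFirst_cons_self]
      simp only [pvSpecKeep]
      rw [if_pos (show (if True then n x + 1 else n x) > 0 by simp; omega)]
      congr 1
      funext y
      by_cases hy : y = x <;> simp [hy]
    · rw [pvRemoveFirst_cons_ne x r al hx]
      simp only [pvSpecKeep]
      have hne : (if x = r then n x + 1 else n x) = n x := by simp [hx]
      rw [hne]
      split_ifs with hp
      · have hcomm : (fun y => if y = x then (if y = r then n y + 1 else n y) - 1 else (if y = r then n y + 1 else n y))
            = (fun y => if y = r then (if y = x then n y - 1 else n y) + 1 else (if y = x then n y - 1 else n y)) := by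
          funext y
          by_cases h1 : y = x
          · subst h1; simp [hx]
          · by_cases h2 : y = r
            · subst h2; simp [h1]
            · simp [h1, h2]
        rw [hcomm, ih _ r (by rw [if_neg (Ne.symm hx)]; exact h)]
      · rw [ih n r h]

theorem pvSpecKeep_zero (al : List String) : pvSpecKeep (fun _ => 0) al = al := by
  induction al with
  | nil => rfl
  | cons x al ih => simp [pvSpecKeep, ih]

theorem pvSpecKeep_congr (n n' : String → Int) (al : List String) (h : ∀ y, n y = n' y) :
    pvSpecKeep n al = pvSpecKeep n' al := by
  have : n = n' := funext h
  rw [this]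

-- A's sequential removals = drop the first (count) occurrences of each value
theorem pvRemoveSeq_eq_specKeep (rs : List String) (al : List String) :
    pvRemoveSeq rs al = pvSpecKeep (fun y => (rs.count y : Int)) al := by
  induction rs generalizing al with
  | nil =>
    simp only [pvRemoveSeq, List.foldl_nil]
    rw [pvSpecKeep_congr _ (fun _ => 0) al (by simp)]
    exact (pvSpecKeep_zero al).symm
  | cons r rs ih =>
    have h1 : pvRemoveSeq (r :: rs) al = pvRemoveSeq rs (pvRemoveFirst al r) := rfl
    rw [h1, ih, ← pvSpecKeep_bump al (fun y => (rs.count y : Int)) r (Int.natCast_nonneg _)]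
    apply pvSpecKeep_congr
    intro y
    by_cases hy : y = r
    · subst hy; simp
    · simp [hy, Ne.symm hy]

-- characterization of A's fold
theorem pvA_fold (vocab : List String) :
    ∀ (zl : List Int) (al : List String),
      vocab.foldl
        (fun (st : List Int × List String) v =>
          if PySem.Str.isIn "_" v then
            (st.1 ++ [1], if st.2.contains v then (PySem.List.remove? st.2 v).getD st.2 else st.2)
          else if v == "<EOS>" then
            (st.1 ++ [2], if st.2.contains "<EOS>" then (PySem.List.remove? st.2 "<EOS>").getD st.2 else st.2)
          else
            (st.1 ++ [3], st.2))
        (zl, al)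
      = (zl ++ vocab.map pvCode, pvRemoveSeq (vocab.filterMap pvAttempt) al) := by
  induction vocab with
  | nil => intro zl al; simp [pvRemoveSeq]
  | cons v vs ih =>
    intro zl al
    by_cases h1 : PySem.Str.isIn "_" v
    · have h1' : PySem.Chars.isIn ['_'] v.toList = true := by simpa using h1
      have hc : pvCode v = 1 := by simp [pvCode, h1']
      have ha : pvAttempt v = some v := by simp [pvAttempt, h1']
      rw [List.foldl_cons, if_pos h1, ih]
      simp only [List.map_cons, List.filterMap_cons, ha, hc]
      simp [pvRemoveSeq, pvRemoveFirst]
    · have h1' : PySem.Chars.isIn ['_'] v.toList = false := by simpa using h1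
      by_cases h2 : v == "<EOS>"
      · have h2' : v = "<EOS>" := by simpa using h2
        have hno : PySem.Chars.isIn ['_'] ['<', 'E', 'O', 'S', '>'] = false := by decide
        have hc : pvCode v = 2 := by simp [pvCode, h2', hno]
        have ha : pvAttempt v = some "<EOS>" := by simp [pvAttempt, h2', hno]
        rw [List.foldl_cons, if_neg h1, if_pos h2, ih]
        simp only [List.map_cons, List.filterMap_cons, ha, hc]
        simp [pvRemoveSeq, pvRemoveFirst]
      · have h2' : ¬ v = "<EOS>" := by simpa using h2
        have hc : pvCode v = 3 := by simp [pvCode, h1', h2']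
        have ha : pvAttempt v = none := by simp [pvAttempt, h1', h2']
        rw [List.foldl_cons, if_neg h1, if_neg h2, ih]
        simp only [List.map_cons, List.filterMap_cons, ha, hc]
        simp

-- characterization of B's first fold
theorem pvB_fold1 (vocab : List String) :
    ∀ (zl : List Int) (d : PySem.Dict String Int),
      vocab.foldl
        (fun (st : List Int × PySem.Dict String Int) tok =>
          if PySem.Str.isIn "_" tok then
            (st.1 ++ [1], st.2.insert tok (st.2.getD tok 0 + 1))
          else if tok == "<EOS>" then
            (st.1 ++ [2], st.2.insert "<EOS>" (st.2.getD "<EOS>" 0 + 1))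
          else
            (st.1 ++ [3], st.2))
        (zl, d)
      = (zl ++ vocab.map pvCode,
         (vocab.foldl
           (fun (e : PySem.Dict String Int) tok =>
             match pvAttempt tok with
             | some r => e.insert r (e.getD r 0 + 1)
             | none => e) d)) := by
  induction vocab with
  | nil => intro zl d; simp
  | cons v vs ih =>
    intro zl d
    by_cases h1 : PySem.Str.isIn "_" v
    · have h1' : PySem.Chars.isIn ['_'] v.toList = true := by simpa using h1
      have hc : pvCode v = 1 := by simp [pvCode, h1']
      have ha : pvAttempt v = some v := by simp [pvAttempt, h1']
      rw [List.foldl_cons, if_pos h1, ih, List.foldl_cons]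
      simp only [List.map_cons, ha, hc]
      simp
    · have h1' : PySem.Chars.isIn ['_'] v.toList = false := by simpa using h1
      by_cases h2 : v == "<EOS>"
      · have h2' : v = "<EOS>" := by simpa using h2
        have hno : PySem.Chars.isIn ['_'] ['<', 'E', 'O', 'S', '>'] = false := by decide
        have hc : pvCode v = 2 := by simp [pvCode, h2', hno]
        have ha : pvAttempt v = some "<EOS>" := by simp [pvAttempt, h2', hno]
        rw [List.foldl_cons, if_neg h1, if_pos h2, ih, List.foldl_cons]
        simp only [List.map_cons, ha, hc]
        simp
      · have h2' : ¬ v = "<EOS>" := by simpa using h2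
        have hc : pvCode v = 3 := by simp [pvCode, h1', h2']
        have ha : pvAttempt v = none := by simp [pvAttempt, h1', h2']
        rw [List.foldl_cons, if_neg h1, if_neg h2, ih, List.foldl_cons]
        simp only [List.map_cons, ha, hc]
        simp

-- the counter built by B counts the removal attempts
theorem pvB_counter (vocab : List String) :
    ∀ (d : PySem.Dict String Int) (y : String),
      (vocab.foldl
        (fun (e : PySem.Dict String Int) tok =>
          match pvAttempt tok with
          | some r => e.insert r (e.getD r 0 + 1)
          | none => e) d).getD y 0
      = d.getD y 0 + ((vocab.filterMap pvAttempt).count y : Int) := by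
  induction vocab with
  | nil => intro d y; simp
  | cons v vs ih =>
    intro d y
    cases ha : pvAttempt v with
    | none =>
      simp only [List.foldl_cons, ha, List.filterMap_cons]
      rw [ih]
    | some r =>
      simp only [List.foldl_cons, ha, List.filterMap_cons]
      rw [ih]
      by_cases hy : y = r
      · subst hy
        rw [PySem.Dict.getD_insert_self]
        simp
        omega
      · rw [PySem.Dict.getD_insert_of_ne _ _ _ hy]
        simp [Ne.symm hy]

-- B's second fold keeps exactly what pvSpecKeep keeps
theorem pvB_fold2 (al : List String) :
    ∀ (d : PySem.Dict String Int) (acc : List String),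
      (al.foldl
        (fun (st : PySem.Dict String Int × List String) x =>
          if st.1.getD x 0 > 0 then (st.1.insert x (st.1.getD x 0 - 1), st.2) else (st.1, st.2 ++ [x]))
        (d, acc)).2
      = acc ++ pvSpecKeep (fun y => d.getD y 0) al := by
  induction al with
  | nil => intro d acc; simp [pvSpecKeep]
  | cons x al ih =>
    intro d acc
    by_cases hp : d.getD x 0 > 0
    · rw [List.foldl_cons, if_pos hp, ih]
      simp only [pvSpecKeep]
      rw [if_pos hp]
      congr 1
      apply pvSpecKeep_congr
      intro y
      by_cases hy : y = x
      · subst hy; rw [PySem.Dict.getD_insert_self]; simp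
      · rw [PySem.Dict.getD_insert_of_ne _ _ _ hy]; simp [hy]
    · rw [List.foldl_cons, if_neg hp, ih]
      simp only [pvSpecKeep]
      rw [if_neg hp]
      simp

-- ===== VERDICT (by name: the statement is the Claim_ definition above) =====
theorem initialize_zeroone_list_spec : Claim_equal_initialize_zeroone_list := by
  intro vocab alphabets _
  unfold Spec_initialize_zeroone_list initialize_zeroone_list initialize_zeroone_list_alt
  simp only [pvA_fold, pvB_fold1, pvB_fold2, List.nil_append, Prod.mk.injEq]
  refine ⟨by trivial, ?_⟩
  rw [pvRemoveSeq_eq_specKeep]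
  exact pvSpecKeep_congr _ _ _ (fun y => by rw [pvB_counter]; simp)
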